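-- pv_equiv track=rewrite | github.com/XianghuWang-287/Metabolomics_Clustering_Benchmark | src/cluster_benchmark_MS_RT.py | assign_size_range_bin
-- ===== SOURCE A (Python) =====
-- def assign_size_range_bin(size):
--     if size == 1:
--         return '1 to 1'  # Change here to ensure sorting works
--     else:
--         upper_limit = 2
--         while size > upper_limit:
--             upper_limit *= 2
--         return f"{upper_limit//2+1} to {upper_limit}"
-- ===== SOURCE B (Python) =====
-- def assign_size_range_bin(size):
--     if size == 1:
--         return '1 to 1'
--     if size <= 2:
--         return '2 to 2'
--     upper = 1 << (size - 1).bit_length()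
--     return f"{upper//2+1} to {upper}"
-- ===== Notes on version B (the rewrite author's own statement) =====
-- stated objective: simpler
-- what changed: Replaced the doubling while-loop with the closed form 1 << (size-1).bit_length() (smallest power of two >= size), keeping the two small-size boundary returns explicit.
import Mathlib
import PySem

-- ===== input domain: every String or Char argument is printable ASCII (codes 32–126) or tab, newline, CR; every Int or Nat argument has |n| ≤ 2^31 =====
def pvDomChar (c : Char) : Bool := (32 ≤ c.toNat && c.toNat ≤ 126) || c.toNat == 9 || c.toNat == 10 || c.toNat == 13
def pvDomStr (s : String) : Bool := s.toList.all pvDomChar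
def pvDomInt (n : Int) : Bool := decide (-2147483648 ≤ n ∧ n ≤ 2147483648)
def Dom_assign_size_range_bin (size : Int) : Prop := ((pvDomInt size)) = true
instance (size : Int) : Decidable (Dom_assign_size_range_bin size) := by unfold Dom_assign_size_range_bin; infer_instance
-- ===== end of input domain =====

-- B replaces A's doubling loop by the closed form 1 << (size-1).bit_length() (objective: simpler).

-- ===== PORT A =====
-- A's while loop: double `upper` while size > upper.  The invariant 1 ≤ upper is
-- carried as a proof argument only to justify termination; it never changes the value.
def assignSizeLoop (size : Int) (upper : Int) (h : 1 ≤ upper) : Int :=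
  if hlt : upper < size then assignSizeLoop size (upper * 2) (by omega) else upper
termination_by (size - upper).toNat
decreasing_by omega

def assign_size_range_bin (size : Int) : String :=
  if size == 1 then "1 to 1"
  else
    let upper_limit := assignSizeLoop size 2 (by norm_num)
    PySem.Int.toStr (PySem.Int.floordiv upper_limit 2 + 1) ++ " to " ++ PySem.Int.toStr upper_limit

-- ===== PORT B =====
-- `1 << n` is 2^n; Python's (m).bit_length() for m ≥ 0 is Nat.size.
def assign_size_range_bin_alt (size : Int) : String :=
  if size == 1 then "1 to 1"
  else if size ≤ 2 then "2 to 2"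
  else
    let upper : Int := 2 ^ Nat.size (size - 1).toNat
    PySem.Int.toStr (PySem.Int.floordiv upper 2 + 1) ++ " to " ++ PySem.Int.toStr upper

-- ===== PRECONDITION & SPEC =====
def Spec_assign_size_range_bin (size : Int) (out : String) : Prop := out = assign_size_range_bin_alt size
instance (size : Int) (out : String) : Decidable (Spec_assign_size_range_bin size out) := by unfold Spec_assign_size_range_bin; infer_instance

-- ===== CLAIM (what is proved, stated in full; the proofs are below) =====
def Claim_equal_assign_size_range_bin : Prop := ∀ (size : Int), Dom_assign_size_range_bin size → Spec_assign_size_range_bin size (assign_size_range_bin size)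

-- ===== LEMMAS AND PROOFS =====

-- A's loop started at a power of two below `size` ends at 2^(bit_length (size-1)),
-- the least power of two ≥ size.
theorem assignSizeLoop_eq (size : Int) (k : ℕ) (h : (1:Int) ≤ 2 ^ k)
    (hlt : (2:Int) ^ k < size) :
    assignSizeLoop size (2 ^ k) h = 2 ^ Nat.size (size - 1).toNat := by
  rw [assignSizeLoop, dif_pos hlt]
  have hpow : (2:Int) ^ k * 2 = 2 ^ (k + 1) := by ring
  by_cases h2 : (2:Int) ^ (k + 1) < size
  · have := assignSizeLoop_eq size (k + 1) (by exact one_le_pow₀ (by norm_num)) h2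
    simpa [hpow] using this
  · -- terminal step: 2^k < size ≤ 2^(k+1), so bit_length (size-1) = k+1
    have hstop : ¬ (2:Int) ^ k * 2 < size := by rw [hpow]; exact h2
    rw [assignSizeLoop, dif_neg hstop, hpow]
    congr 1
    have hc : ((2:ℤ) ^ k) = ((2 ^ k : ℕ) : ℤ) := by push_cast; ring
    have hc1 : ((2:ℤ) ^ (k+1)) = ((2 ^ (k+1) : ℕ) : ℤ) := by push_cast; ring
    have hlo : 2 ^ k ≤ (size - 1).toNat := by omega
    have hhi : (size - 1).toNat < 2 ^ (k + 1) := by omega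
    have h1 : k < Nat.size (size - 1).toNat := Nat.lt_size.2 hlo
    have h2' : Nat.size (size - 1).toNat ≤ k + 1 := Nat.size_le.2 hhi
    omega
termination_by (size - 2 ^ k).toNat
decreasing_by
  have : (2:Int) ^ k * 2 = 2 ^ (k+1) := by ring
  omega

-- ===== VERDICT (by name: the statement is the Claim_ definition above) =====
theorem assign_size_range_bin_spec : Claim_equal_assign_size_range_bin := by
  intro size _
  unfold Spec_assign_size_range_bin assign_size_range_bin assign_size_range_bin_alt
  by_cases h1 : size = 1
  · simp [h1]
  · simp only [beq_iff_eq, h1, if_false]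
    by_cases h2 : size ≤ 2
    · have hstop : ¬ (2:Int) < size := by omega
      rw [assignSizeLoop, dif_neg hstop, if_pos h2]
      decide
    · have hlt : (2:Int) ^ 1 < size := by push_cast; omega
      have := assignSizeLoop_eq size 1 (by norm_num) hlt
      norm_num at this
      simp [h2, this]
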